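-- pv_equiv track=rewrite | github.com/Cheerfulmoss/Rubix-Cube | util.py | gen_colour_id
-- ===== SOURCE A (Python) =====
-- def gen_colour_id(f_id: int) -> str:
--     col_id = list()
--
--     strfid = str(f_id)
--
--     for root_index in range(0, len(strfid), 2):
--         alpha_index = int(strfid[root_index:root_index + 2])
--         while alpha_index > 25:
--             col_id.append("Z-")
--             alpha_index -= 25
--
--         col_id.append(chr(alpha_index + 65))
--
--     return "".join(col_id)
-- ===== SOURCE B (Python) =====
-- def gen_colour_id(f_id: int) -> str:
--     s = str(f_id)
--     out = []
--     for i in range(0, len(s), 2):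
--         a = int(s[i:i + 2])
--         k = (a - 26) // 25 + 1 if a > 25 else 0
--         out.append("Z-" * k + chr(a - 25 * k + 65))
--     return "".join(out)
-- ===== Notes on version B (the rewrite author's own statement) =====
-- stated objective: simpler
-- what changed: The inner while-loop that repeatedly appends the overflow marker and subtracts is replaced by a closed-form floor-division overflow count per two-digit chunk, so each chunk's whole contribution is emitted in one step by a single map over the chunks.
import Mathlib
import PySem

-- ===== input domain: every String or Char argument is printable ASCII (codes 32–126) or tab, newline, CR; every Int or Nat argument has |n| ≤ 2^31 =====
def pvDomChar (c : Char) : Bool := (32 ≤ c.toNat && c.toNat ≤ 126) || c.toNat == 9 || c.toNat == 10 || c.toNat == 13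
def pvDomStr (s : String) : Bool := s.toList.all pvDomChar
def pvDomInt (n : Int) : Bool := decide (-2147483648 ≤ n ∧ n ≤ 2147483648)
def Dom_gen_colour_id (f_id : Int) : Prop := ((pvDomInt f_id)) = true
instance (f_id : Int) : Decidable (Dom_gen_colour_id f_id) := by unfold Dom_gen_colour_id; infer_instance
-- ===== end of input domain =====

-- B replaces A's inner 'while alpha_index > 25: append "Z-"' loop by a closed-form
-- overflow count per two-digit chunk; return values proved equal on all of Dom.

-- ===== PORT A =====

-- chr(n): exact for 0 ≤ n < 0xD800; every code reached here lies in 56..90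
def pyChr (n : Int) : Char := Char.ofNat n.toNat

-- the inner 'while alpha_index > 25' loop, carrying the col_id accumulator
def gcWhile (a : Int) (acc : List String) : List String × Int :=
  if a > 25 then gcWhile (a - 25) (acc ++ ["Z-"]) else (acc, a)
termination_by a.toNat
decreasing_by omega

-- int(chunk) never raises here (chunks of str(n) are "d", "dd" or "-d"), so .getD 0 is unreachable
def gen_colour_id (f_id : Int) : String :=
  let strfid := PySem.Int.toStr f_id
  let col_id := (PySem.List.pyRange 0 (PySem.Str.len strfid) 2).foldl
    (fun acc ri =>
      let alpha := (PySem.Int.ofStr? (PySem.Str.slice strfid (some ri) (some (ri + 2)))).getD 0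
      let p := gcWhile alpha acc
      p.1 ++ [String.ofList [pyChr (p.2 + 65)]]) []
  PySem.Str.join "" col_id

-- ===== PORT B =====

-- "Z-" * k ported by hand as join of replicate (exact for k as a count, k ≤ 0 → "")
def gen_colour_id_alt (f_id : Int) : String :=
  let s := PySem.Int.toStr f_id
  let out := (PySem.List.pyRange 0 (PySem.Str.len s) 2).map
    (fun i =>
      let a := (PySem.Int.ofStr? (PySem.Str.slice s (some i) (some (i + 2)))).getD 0
      let k : Int := if a > 25 then PySem.Int.floordiv (a - 26) 25 + 1 else 0
      PySem.Str.join "" (List.replicate k.toNat "Z-") ++ String.ofList [pyChr (a - 25 * k + 65)])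
  PySem.Str.join "" out

-- ===== PRECONDITION & SPEC =====
def Spec_gen_colour_id (f_id : Int) (out : String) : Prop := out = gen_colour_id_alt f_id
instance (f_id : Int) (out : String) : Decidable (Spec_gen_colour_id f_id out) := by unfold Spec_gen_colour_id; infer_instance

-- ===== CLAIM (what is proved, stated in full; the proofs are below) =====
def Claim_equal_gen_colour_id : Prop := ∀ (f_id : Int), Dom_gen_colour_id f_id → Spec_gen_colour_id f_id (gen_colour_id f_id)

-- ===== LEMMAS AND PROOFS =====

-- the closed-form overflow count of B
def kOf (a : Int) : Int := if a > 25 then PySem.Int.floordiv (a - 26) 25 + 1 else 0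

theorem kOf_eq (a : Int) : kOf a = if a > 25 then (a - 26) / 25 + 1 else 0 := by
  unfold kOf
  split_ifs with h
  · rw [PySem.Int.floordiv_eq_ediv_of_pos (by omega)]
  · rfl

theorem gcWhile_eq (a : Int) (acc : List String) :
    gcWhile a acc = (acc ++ List.replicate (kOf a).toNat "Z-", a - 25 * kOf a) := by
  by_cases h : a > 25
  · rw [gcWhile, if_pos h, gcWhile_eq (a - 25)]
    have hk : kOf a = kOf (a - 25) + 1 := by
      rw [kOf_eq, kOf_eq]
      split_ifs <;> omega
    have hk0 : 0 ≤ kOf (a - 25) := by rw [kOf_eq]; split_ifs <;> omega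
    rw [hk, Prod.mk.injEq]
    refine ⟨?_, by ring⟩
    have h1 : (kOf (a - 25) + 1).toNat = (kOf (a - 25)).toNat + 1 := by omega
    rw [h1, List.replicate_succ, List.append_assoc]
    rfl
  · rw [gcWhile, if_neg h]
    have : kOf a = 0 := by rw [kOf_eq, if_neg h]
    simp [this]
termination_by a.toNat
decreasing_by omega

theorem chars_join_empty (ps : List (List Char)) :
    PySem.Chars.join [] ps = ps.flatten := by
  match ps with
  | [] => simp [PySem.Chars.join_nil]
  | [p] => simp [PySem.Chars.join_singleton]
  | p :: q :: rest =>
    rw [PySem.Chars.join_cons_cons, chars_join_empty (q :: rest)]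
    simp

theorem join_empty (ps : List String) :
    (PySem.Str.join "" ps).toList = (ps.map String.toList).flatten := by
  rw [PySem.Str.toList_join]
  exact chars_join_empty _

theorem str_eq_of_toList {s t : String} (h : s.toList = t.toList) : s = t := by
  exact String.toList_inj.mp h

theorem flatten_flatMap_eq (l : List Int) (G : Int → List String) (b : Int → String)
    (h : ∀ i, ((G i).map String.toList).flatten = (b i).toList) :
    ((l.flatMap G).map String.toList).flatten = ((l.map b).map String.toList).flatten := by
  induction l with
  | nil => simp
  | cons i rest ih => simp [ih, h i]

theorem gen_colour_id_eq_alt (f_id : Int) : gen_colour_id f_id = gen_colour_id_alt f_id := by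
  unfold gen_colour_id gen_colour_id_alt
  apply str_eq_of_toList
  rw [join_empty, join_empty]
  set s := PySem.Int.toStr f_id
  set l := PySem.List.pyRange 0 (PySem.Str.len s) 2 with hl
  -- group what A appends for each chunk index
  have hfold :
      l.foldl (fun acc ri =>
        let alpha := (PySem.Int.ofStr? (PySem.Str.slice s (some ri) (some (ri + 2)))).getD 0
        let p := gcWhile alpha acc
        p.1 ++ [String.ofList [pyChr (p.2 + 65)]]) [] =
      l.flatMap (fun ri =>
        let alpha := (PySem.Int.ofStr? (PySem.Str.slice s (some ri) (some (ri + 2)))).getD 0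
        List.replicate (kOf alpha).toNat "Z-" ++ [String.ofList [pyChr (alpha - 25 * kOf alpha + 65)]]) := by
    have := PySem.List.foldl_append_eq_flatMap
      (g := fun ri =>
        let alpha := (PySem.Int.ofStr? (PySem.Str.slice s (some ri) (some (ri + 2)))).getD 0
        List.replicate (kOf alpha).toNat "Z-" ++ [String.ofList [pyChr (alpha - 25 * kOf alpha + 65)]])
      (l := l) (acc := [])
    simp only [List.nil_append] at this
    rw [← this]
    apply PySem.List.foldl_congr_mem
    intro acc ri _
    simp only [gcWhile_eq]
    simp [List.append_assoc]
  rw [hfold]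
  apply flatten_flatMap_eq
  intro i
  set a := (PySem.Int.ofStr? (PySem.Str.slice s (some i) (some (i + 2)))).getD 0 with ha
  show ((List.replicate (kOf a).toNat "Z-" ++ [String.ofList [pyChr (a - 25 * kOf a + 65)]]).map String.toList).flatten
      = (PySem.Str.join "" (List.replicate (kOf a).toNat "Z-") ++ String.ofList [pyChr (a - 25 * kOf a + 65)]).toList
  rw [String.toList_append, join_empty]
  simp

-- ===== VERDICT (by name: the statement is the Claim_ definition above) =====
theorem gen_colour_id_spec : Claim_equal_gen_colour_id := by
  intro f_id _
  unfold Spec_gen_colour_id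
  exact gen_colour_id_eq_alt f_id
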